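-- pv_equiv track=rewrite | github.com/Lucasbahr/meuct-manager-api | app/services/payment_webhook_security.py | _parse_mp_x_signature
-- ===== SOURCE A (Python) =====
-- def _parse_mp_x_signature(value: str | None) -> tuple[str | None, str | None]:
--     if not value:
--         return None, None
--     ts, v1 = None, None
--     for part in value.split(","):
--         part = part.strip()
--         if "=" not in part:
--             continue
--         k, v = part.split("=", 1)
--         k, v = k.strip(), v.strip()
--         if k == "ts":
--             ts = v
--         elif k == "v1":
--             v1 = v
--     return ts, v1
-- ===== SOURCE B (Python) =====
-- def _parse_mp_x_signature(value):
--     if not value: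
--         return None, None
--     parts = [p.strip() for p in value.split(",")]
--
--     def last_value(key):
--         # scan back-to-front; the first hit from the right is the last occurrence
--         for part in reversed(parts):
--             if "=" in part:
--                 k, v = part.split("=", 1)
--                 if k.strip() == key:
--                     return v.strip()
--         return None
--
--     return last_value("ts"), last_value("v1")
-- ===== Notes on version B (the rewrite author's own statement) =====
-- stated objective: alternative
-- what changed: Replaces A's single forward fold with mutable (ts, v1) state and if/elif dispatch by two independent backward scans with early return: for each key, walk the stripped parts from the end and return the first matching value (which is A's last-wins result).
import Mathlib
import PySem

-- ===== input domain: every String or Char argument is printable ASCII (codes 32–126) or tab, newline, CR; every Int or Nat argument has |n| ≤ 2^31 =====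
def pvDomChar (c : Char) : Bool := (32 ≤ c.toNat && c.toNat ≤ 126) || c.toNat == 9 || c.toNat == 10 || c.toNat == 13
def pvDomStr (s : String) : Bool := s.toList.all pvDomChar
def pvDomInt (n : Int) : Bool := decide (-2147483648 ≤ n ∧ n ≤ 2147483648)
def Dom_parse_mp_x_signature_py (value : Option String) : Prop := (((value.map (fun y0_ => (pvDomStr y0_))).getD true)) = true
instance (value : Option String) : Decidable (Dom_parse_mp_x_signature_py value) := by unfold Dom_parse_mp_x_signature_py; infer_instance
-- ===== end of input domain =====

-- B replaces A's single forward fold with (ts, v1) state and if/elif dispatch by two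
-- independent backward scans with early return (first hit from the right = last wins).

-- ===== PORT A =====
-- loop body of A: strip the part, skip it without '=', else split once on '=' and
-- update the (ts, v1) state by branching on the stripped key
def pvAStep (st : Option String × Option String) (part : String) : Option String × Option String :=
  let p := PySem.Str.strip part
  if PySem.Str.isIn "=" p = false then st
  else
    match PySem.Str.splitMax? p "=" 1 with
    | some [k, v] =>
      let k' := PySem.Str.strip k
      let v' := PySem.Str.strip v
      if k' = "ts" then (some v', st.2)
      else if k' = "v1" then (st.1, some v')
      else st
    | _ => st  -- unreachable: '=' in p guarantees exactly two pieces

def parse_mp_x_signature_py (value : Option String) : Option String × Option String :=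
  match value with
  | none => (none, none)
  | some s =>
    if s = "" then (none, none)  -- 'if not value'
    else
      match PySem.Str.split? s "," with
      | some parts => parts.foldl pvAStep (none, none)
      | none => (none, none)  -- unreachable: separator "," is nonempty

-- ===== PORT B =====
-- B's 'last_value': walk the (already-stripped, reversed) parts, return the first match
def pvLastValue (key : String) : List String → Option String
  | [] => none
  | p :: rest =>
    if PySem.Str.isIn "=" p then
      match PySem.Str.splitMax? p "=" 1 with
      | some [k, v] =>
        if PySem.Str.strip k = key then some (PySem.Str.strip v) else pvLastValue key rest
      | _ => pvLastValue key rest  -- unreachable: '=' in p guarantees exactly two pieces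
    else pvLastValue key rest

def parse_mp_x_signature_py_alt (value : Option String) : Option String × Option String :=
  match value with
  | none => (none, none)
  | some s =>
    if s = "" then (none, none)  -- 'if not value'
    else
      match PySem.Str.split? s "," with
      | some raw =>
        let parts := raw.map PySem.Str.strip
        (pvLastValue "ts" parts.reverse, pvLastValue "v1" parts.reverse)
      | none => (none, none)  -- unreachable: separator "," is nonempty

-- ===== PRECONDITION & SPEC =====
def Spec_parse_mp_x_signature_py (value : Option String) (out : Option String × Option String) : Prop := out = parse_mp_x_signature_py_alt value
instance (value : Option String) (out : Option String × Option String) : Decidable (Spec_parse_mp_x_signature_py value out) := by unfold Spec_parse_mp_x_signature_py; infer_instance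

-- ===== CLAIM (what is proved, stated in full; the proofs are below) =====
def Claim_equal_parse_mp_x_signature_py : Prop := ∀ (value : Option String), Dom_parse_mp_x_signature_py value → Spec_parse_mp_x_signature_py value (parse_mp_x_signature_py value)

-- ===== LEMMAS AND PROOFS =====

-- A's fold from any start state equals B's backward scans, falling back to the start
-- state when the key never occurs
lemma pvLoop_eq (parts : List String) (t0 v0 : Option String) :
    parts.foldl pvAStep (t0, v0) =
      ((pvLastValue "ts" (parts.map PySem.Str.strip).reverse).or t0,
       (pvLastValue "v1" (parts.map PySem.Str.strip).reverse).or v0) := by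
  induction parts using List.reverseRecOn generalizing t0 v0 with
  | nil => rfl
  | append_singleton l part ih =>
    rw [List.foldl_append, List.map_append, List.reverse_append, ih]
    simp only [List.map_cons, List.map_nil, List.reverse_cons, List.reverse_nil,
      List.nil_append, List.cons_append, List.singleton_append]
    simp only [List.foldl_cons, List.foldl_nil, pvAStep, pvLastValue]
    by_cases hc : PySem.Str.isIn "=" (PySem.Str.strip part) = false
    · rw [if_pos hc, if_neg (by rw [hc]; decide), if_neg (by rw [hc]; decide)]
    · have hc' : PySem.Str.isIn "=" (PySem.Str.strip part) = true := by
        revert hc; cases PySem.Str.isIn "=" (PySem.Str.strip part) <;> simp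
      rw [if_neg hc, if_pos hc', if_pos hc']
      cases hsp : PySem.Str.splitMax? (PySem.Str.strip part) "=" 1 with
      | none => rfl
      | some pieces =>
        match pieces with
        | [] => rfl
        | [k] => rfl
        | k :: v :: w :: rest => rfl
        | [k, v] =>
          simp only
          by_cases hts : PySem.Str.strip k = "ts"
          · simp [hts, Option.or]
          · by_cases hv1 : PySem.Str.strip k = "v1"
            · simp [hv1, Option.or]
            · simp [hts, hv1]

-- ===== VERDICT (by name: the statement is the Claim_ definition above) =====
theorem parse_mp_x_signature_py_spec : Claim_equal_parse_mp_x_signature_py := by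
  intro value _
  unfold Spec_parse_mp_x_signature_py
  cases value with
  | none => rfl
  | some s =>
    simp only [parse_mp_x_signature_py, parse_mp_x_signature_py_alt]
    by_cases hs : s = ""
    · rw [if_pos hs, if_pos hs]
    · rw [if_neg hs, if_neg hs]
      cases hp : PySem.Str.split? s "," with
      | none => rfl
      | some parts => simpa using pvLoop_eq parts none none
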